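-- pv_equiv track=rewrite | github.com/pypi-data/pypi-mirror-71 | packages/admcycles/admcycles-1.1-py2-none-any.whl/admcycles/diffstrata/levelstratum.py | adm_key
-- ===== SOURCE A (Python) =====
-- from collections import Counter, defaultdict
--
-- def adm_key(sig, psis):
--     """
--     The hash of a psi monomial on a connected stratum without residue conditions.
--
--     This is used for caching the values computed using admcycles (using
--     GeneralisedStratum.adm_evaluate)
--
--     The signature is sorted, the psis are renumbered accordingly and also
--     sorted (with the aim of computing as few duplicates as possible).
--
--     Args:
--         sig (tuple): signature tuple
--         psis (dict): psi dictionary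
--
--     Returns:
--         tuple: nested tuple
--     """
--     sorted_psis = {}
--     sorted_sig  = []
--     psi_by_order = defaultdict(list)
--     # sort signature and relabel psis accordingly:
--     # NOTE: Psis are labelled 'mathematically', i.e. 1,...,len(sig)
--     for new_i, (old_i, order) in enumerate(sorted(enumerate(sig), key=lambda k: k[1])):
--         psi_new_i = new_i + 1
--         psi_old_i = old_i + 1
--         sorted_sig.append(order)
--         if psi_old_i in psis:
--             assert not (psi_new_i in sorted_psis)
--             psi_exp = psis[psi_old_i]
--             sorted_psis[psi_new_i] = psi_exp
--             psi_by_order[order].append(psi_exp)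
--     # sort psis for points of same order:
--     ordered_sorted_psis = {}
--     i = 0
--     assert len(sig) == len(sorted_sig)
--     while i < len(sig):
--         order = sorted_sig[i]
--         for j, psi_exp in enumerate(sorted(psi_by_order[order])):
--             assert sorted_sig[i+j] == order
--             ordered_sorted_psis[i+j+1] = psi_exp
--         while i < len(sig) and sorted_sig[i] == order:
--             i += 1
--     return (tuple(sorted_sig), tuple(sorted(ordered_sorted_psis.items())))
-- ===== SOURCE B (Python) =====
-- from collections import Counter, defaultdict
--
-- def adm_key(sig, psis):
--     # Group psi exponents by marked-point order in one pass over the original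
--     # signature, then lay the pairs out run by run over the sorted signature.
--     exps = defaultdict(list)
--     for idx, order in enumerate(sig):
--         if idx + 1 in psis:
--             exps[order].append(psis[idx + 1])
--     counts = Counter(sig)
--     pairs = []
--     pos = 0
--     for order in sorted(counts):
--         for j, e in enumerate(sorted(exps[order])):
--             pairs.append((pos + j + 1, e))
--         pos += counts[order]
--     return (tuple(sorted(sig)), tuple(pairs))
-- ===== Notes on version B (the rewrite author's own statement) =====
-- stated objective: simpler
-- what changed: B drops A's sort of index pairs and its nested while-loop run scan: it groups psi exponents by order in one pass over the original signature, counts orders with a Counter, and emits the position/exponent pairs directly in order per distinct sorted order with a running offset, so no final sort of the pairs is needed.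
import Mathlib
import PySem

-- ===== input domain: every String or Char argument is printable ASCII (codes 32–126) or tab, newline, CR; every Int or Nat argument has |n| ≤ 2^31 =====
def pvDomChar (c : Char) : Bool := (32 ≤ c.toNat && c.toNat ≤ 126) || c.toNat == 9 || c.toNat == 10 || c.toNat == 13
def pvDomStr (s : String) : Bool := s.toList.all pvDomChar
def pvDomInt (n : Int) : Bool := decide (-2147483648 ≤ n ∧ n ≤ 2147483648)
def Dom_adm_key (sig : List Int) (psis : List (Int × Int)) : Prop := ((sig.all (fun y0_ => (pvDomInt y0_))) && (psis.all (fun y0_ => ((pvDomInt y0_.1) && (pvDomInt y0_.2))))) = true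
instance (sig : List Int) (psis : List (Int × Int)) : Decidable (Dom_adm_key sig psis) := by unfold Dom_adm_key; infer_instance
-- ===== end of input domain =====

-- B computes the same canonical key by grouping psi exponents per order in one pass and
-- laying the pairs out run by run over the sorted signature (objective: simpler — no sort
-- of index pairs, no nested while-loop run scan, no final sort of the pairs).

-- ===== PORT A =====
-- inner `while i < len(sig) and sorted_sig[i] == order: i += 1` of A's second phase
def admSkipA (ss : List Int) (order : Int) (i : Nat) : Nat :=
  if h : i < ss.length ∧ ss.getD i 0 = order then admSkipA ss order (i + 1) else i
termination_by ss.length - i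
decreasing_by omega

-- termination facts for A's outer while loop (cited by admLoopA's decreasing_by)
theorem admSkipA_ge (ss : List Int) (order : Int) (i : Nat) : i ≤ admSkipA ss order i := by
  fun_induction admSkipA with
  | case1 i h ih => omega
  | case2 i h => omega

theorem admSkipA_gt (ss : List Int) (i : Nat) (h : i < ss.length) :
    i < admSkipA ss (ss.getD i 0) i := by
  rw [admSkipA]
  split
  · have := admSkipA_ge ss (ss.getD i 0) (i + 1); omega
  · rename_i hc; exact absurd ⟨h, rfl⟩ hc

-- the body of A's first loop `for new_i, (old_i, order) in enumerate(sorted(enumerate(sig), …))`;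
-- state = (sorted_psis, sorted_sig, psi_by_order); `psi_old_i in psis` / `psis[psi_old_i]` is the
-- first-match association-list lookup (Python dict membership + indexing)
def admStepA (psis : List (Int × Int))
    (st : PySem.Dict Int Int × List Int × PySem.Dict Int (List Int))
    (q : Int × (Int × Int)) :
    PySem.Dict Int Int × List Int × PySem.Dict Int (List Int) :=
  match List.lookup (q.2.1 + 1) psis with
  | some exp => (st.1.insert (q.1 + 1) exp, st.2.1 ++ [q.2.2], st.2.2.modify q.2.2 [] (· ++ [exp]))
  | none => (st.1, st.2.1 ++ [q.2.2], st.2.2)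

-- A's second phase: `while i < len(sig): …` filling ordered_sorted_psis
def admLoopA (ss : List Int) (pbo : PySem.Dict Int (List Int))
    (osp : PySem.Dict Int Int) (i : Nat) : PySem.Dict Int Int :=
  if h : i < ss.length then
    let order := ss.getD i 0
    let osp' := (PySem.List.enumerate (PySem.List.sorted (pbo.getD order []) (fun x => x))).foldl
        (fun d je => d.insert ((i : Int) + je.1 + 1) je.2) osp
    admLoopA ss pbo osp' (admSkipA ss order i)
  else osp
termination_by ss.length - i
decreasing_by
  have h1 := admSkipA_gt ss i h
  omega

def adm_key (sig : List Int) (psis : List (Int × Int)) : List Int × (List (Int × Int)) :=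
  let es := PySem.List.sorted (PySem.List.enumerate sig) (fun k => k.2)
  let st := (PySem.List.enumerate es).foldl (admStepA psis) (PySem.Dict.empty, [], PySem.Dict.empty)
  let osp := admLoopA st.2.1 st.2.2 PySem.Dict.empty 0
  (st.2.1, PySem.List.sorted2 osp.items (fun p => p.1) (fun p => p.2))

-- ===== PORT B =====
def adm_key_alt (sig : List Int) (psis : List (Int × Int)) : List Int × (List (Int × Int)) :=
  let exps := (PySem.List.enumerate sig).foldl
      (fun d p => match List.lookup (p.1 + 1) psis with
        | some e => d.modify p.2 [] (· ++ [e])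
        | none => d) PySem.Dict.empty
  let counts := PySem.Dict.counter sig
  let res := (PySem.List.sorted counts.keys (fun x => x)).foldl
      (fun st order =>
        ((PySem.List.enumerate (PySem.List.sorted (exps.getD order []) (fun x => x))).foldl
            (fun ps je => ps ++ [(st.2 + je.1 + 1, je.2)]) st.1,
         st.2 + counts.getD order 0)) (([] : List (Int × Int)), (0 : Int))
  (PySem.List.sorted sig (fun x => x), res.1)

-- ===== PRECONDITION & SPEC =====
def Spec_adm_key (sig : List Int) (psis : List (Int × Int)) (out : List Int × (List (Int × Int))) : Prop := out = adm_key_alt sig psis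
instance (sig : List Int) (psis : List (Int × Int)) (out : List Int × (List (Int × Int))) : Decidable (Spec_adm_key sig psis out) := by unfold Spec_adm_key; infer_instance

-- ===== CLAIM (what is proved, stated in full; the proofs are below) =====
def Claim_equal_adm_key : Prop := ∀ (sig : List Int) (psis : List (Int × Int)), Dom_adm_key sig psis → Spec_adm_key sig psis (adm_key sig psis)

-- ===== LEMMAS AND PROOFS =====

-- sorted multiset of psi exponents attached to marked points of order o
def admE (sig : List Int) (psis : List (Int × Int)) (o : Int) : List Int :=
  PySem.List.sorted ((PySem.List.enumerate sig).filterMap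
    (fun p => if p.2 = o then List.lookup (p.1 + 1) psis else none)) (fun x => x)

-- the canonical pair list both implementations produce, block by block per distinct order
def admR (sig : List Int) (psis : List (Int × Int)) : List Int → Int → List (Int × Int)
  | [], _ => []
  | o :: os, pos =>
      (PySem.List.enumerate (admE sig psis o)).map (fun je => (pos + je.1 + 1, je.2))
        ++ admR sig psis os (pos + (sig.count o : Int))

-- facts about PySem.List.enumerate
theorem enum_map_snd' {α β : Type} (xs : List α) (s : Int) (F : α → β) :
    (PySem.List.enumerate xs s).map (fun q => F q.2) = xs.map F := by
  induction xs generalizing s with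
  | nil => rfl
  | cons x t ih => simp only [PySem.List.enumerate, List.map_cons]; rw [ih]

theorem enum_map_snd {α : Type} (xs : List α) (s : Int) :
    (PySem.List.enumerate xs s).map (fun q => q.2) = xs := by
  rw [enum_map_snd' xs s (fun x => x), List.map_id']

theorem enum_filterMap_snd {α β : Type} (xs : List α) (s : Int) (F : α → Option β) :
    (PySem.List.enumerate xs s).filterMap (fun q => F q.2) = xs.filterMap F := by
  induction xs generalizing s with
  | nil => rfl
  | cons x t ih => simp only [PySem.List.enumerate, List.filterMap_cons]; rw [ih]

theorem enum_countP_snd {α : Type} (xs : List α) (s : Int) (p : α → Bool) :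
    (PySem.List.enumerate xs s).countP (fun q => p q.2) = xs.countP p := by
  induction xs generalizing s with
  | nil => rfl
  | cons x t ih => simp only [PySem.List.enumerate, List.countP_cons]; rw [ih]

theorem enum_mem_fst {α : Type} (xs : List α) (s : Int) (q : Int × α)
    (h : q ∈ PySem.List.enumerate xs s) : s ≤ q.1 ∧ q.1 < s + xs.length := by
  induction xs generalizing s with
  | nil => simp [PySem.List.enumerate] at h
  | cons x t ih =>
    simp only [PySem.List.enumerate, List.mem_cons] at h
    rcases h with h | h
    · subst h; simp
    · have := ih (s + 1) h; simp at this ⊢; omega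

theorem enum_fst_pairwise {α : Type} (xs : List α) (s : Int) :
    (PySem.List.enumerate xs s).Pairwise (fun a b => a.1 < b.1) := by
  induction xs generalizing s with
  | nil => simp [PySem.List.enumerate]
  | cons x t ih =>
    simp only [PySem.List.enumerate]
    refine List.Pairwise.cons ?_ (ih (s + 1))
    intro q hq
    have := enum_mem_fst t (s + 1) q hq
    simp; omega

theorem length_filterMap_if_le {α β : Type} (l : List α) (p : α → Prop) [DecidablePred p]
    (g : α → Option β) :
    (l.filterMap (fun x => if p x then g x else none)).length ≤ l.countP (fun x => decide (p x)) := by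
  induction l with
  | nil => simp
  | cons x t ih =>
    simp only [List.filterMap_cons, List.countP_cons]
    by_cases hp : p x
    · simp only [hp, if_true]
      cases g x <;> simp_all
      omega
    · simp only [hp, if_false]
      simp; omega

-- A's first loop: the built sorted_sig
theorem foldA_ssig (psis : List (Int × Int)) (l : List (Int × (Int × Int)))
    (st : PySem.Dict Int Int × List Int × PySem.Dict Int (List Int)) :
    (l.foldl (admStepA psis) st).2.1 = st.2.1 ++ l.map (fun q => q.2.2) := by
  induction l generalizing st with
  | nil => simp
  | cons q t ih =>
    simp only [List.foldl_cons, List.map_cons, ih]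
    unfold admStepA
    cases List.lookup (q.2.1 + 1) psis <;> simp

-- A's first loop: psi_by_order
theorem foldA_pbo (psis : List (Int × Int)) (l : List (Int × (Int × Int)))
    (st : PySem.Dict Int Int × List Int × PySem.Dict Int (List Int)) (o : Int) :
    ((l.foldl (admStepA psis) st).2.2).getD o []
      = st.2.2.getD o [] ++ l.filterMap (fun q => if q.2.2 = o then List.lookup (q.2.1 + 1) psis else none) := by
  induction l generalizing st with
  | nil => simp
  | cons q t ih =>
    simp only [List.foldl_cons, List.filterMap_cons, ih]
    unfold admStepA
    cases hq : List.lookup (q.2.1 + 1) psis with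
    | none =>
      by_cases ho : q.2.2 = o <;> simp [ho]
    | some e =>
      by_cases ho : q.2.2 = o
      · subst ho; simp
      · simp [ho, PySem.Dict.getD_modify, Ne.symm ho]

-- B's grouping loop
theorem foldB_exps (psis : List (Int × Int)) (l : List (Int × Int))
    (d : PySem.Dict Int (List Int)) (o : Int) :
    (l.foldl (fun d p => match List.lookup (p.1 + 1) psis with
        | some e => d.modify p.2 [] (· ++ [e])
        | none => d) d).getD o []
      = d.getD o [] ++ l.filterMap (fun p => if p.2 = o then List.lookup (p.1 + 1) psis else none) := by
  induction l generalizing d with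
  | nil => simp
  | cons q t ih =>
    simp only [List.foldl_cons, List.filterMap_cons, ih]
    cases hq : List.lookup (q.1 + 1) psis with
    | none =>
      by_cases ho : q.2 = o <;> simp [ho]
    | some e =>
      by_cases ho : q.2 = o
      · subst ho; simp
      · simp [ho, PySem.Dict.getD_modify, Ne.symm ho]

theorem admSkipA_spec (ss : List Int) (o : Int) (i : Nat) :
    admSkipA ss o i = i + ((ss.drop i).takeWhile (fun x => x == o)).length := by
  fun_induction admSkipA with
  | case1 i h ih =>
    obtain ⟨hlen, hval⟩ := h
    have hd : ss.drop i = ss[i] :: ss.drop (i + 1) := List.drop_eq_getElem_cons hlen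
    have hgv : ss.getD i 0 = ss[i] := by
      simp [List.getD, List.getElem?_eq_getElem hlen]
    rw [hd, List.takeWhile_cons]
    simp only [← hgv, hval, beq_self_eq_true, if_true]
    simp [ih]; omega
  | case2 i h =>
    by_cases hlen : i < ss.length
    · have hval : ¬ (ss.getD i 0 = o) := fun hv => h ⟨hlen, hv⟩
      have hd : ss.drop i = ss[i] :: ss.drop (i + 1) := List.drop_eq_getElem_cons hlen
      have hgv : ss.getD i 0 = ss[i] := by
        simp [List.getD, List.getElem?_eq_getElem hlen]
      rw [hd, List.takeWhile_cons]
      have : (ss[i] == o) = false := by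
        rw [beq_eq_false_iff_ne]; rw [hgv] at hval; exact hval
      simp [this]
    · have : ss.drop i = [] := List.drop_eq_nil_of_le (by omega)
      simp [this]

theorem takeWhile_replicate_append (o : Int) (c : Nat) (rest : List Int)
    (h : ∀ x ∈ rest.head?, x ≠ o) :
    (List.replicate c o ++ rest).takeWhile (fun x => x == o) = List.replicate c o := by
  induction c with
  | zero =>
    simp only [List.replicate_zero, List.nil_append]
    cases rest with
    | nil => rfl
    | cons r t =>
      have : (r == o) = false := by rw [beq_eq_false_iff_ne]; exact h r (by simp)
      simp [this]
  | succ n ih =>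
    simp [List.replicate_succ, ih]

-- the inner `for j, psi_exp in enumerate(sorted(…))` of A appends only fresh keys
theorem innerFoldA (l : List Int) (s : Int) (d : PySem.Dict Int Int) (i : Int)
    (h : ∀ kv ∈ d.items, kv.1 < i + s + 1) :
    ((PySem.List.enumerate l s).foldl (fun d je => d.insert (i + je.1 + 1) je.2) d).items
      = d.items ++ (PySem.List.enumerate l s).map (fun je => (i + je.1 + 1, je.2)) := by
  induction l generalizing s d with
  | nil => simp [PySem.List.enumerate]
  | cons x t ih =>
    simp only [PySem.List.enumerate, List.foldl_cons, List.map_cons]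
    have hnc : d.contains (i + s + 1) = false := by
      rw [← Bool.not_eq_true, PySem.Dict.contains_iff_mem_keys]
      intro hk
      unfold PySem.Dict.keys at hk
      obtain ⟨kv, hkv, hfst⟩ := List.mem_map.mp hk
      have := h kv hkv; omega
    rw [ih (s + 1) _ ?_]
    · rw [PySem.Dict.items_insert_of_not_contains d _ hnc]
      simp
    · intro kv hkv
      rw [PySem.Dict.items_insert_of_not_contains d _ hnc] at hkv
      rcases List.mem_append.mp hkv with h1 | h1
      · have := h kv h1; omega
      · rw [List.mem_singleton] at h1; subst h1; simp

theorem admE_length_le (sig : List Int) (psis : List (Int × Int)) (o : Int) :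
    (admE sig psis o).length ≤ sig.count o := by
  unfold admE
  rw [PySem.List.length_sorted]
  have h1 := length_filterMap_if_le (PySem.List.enumerate sig) (fun p : Int × Int => p.2 = o)
      (fun p => List.lookup (p.1 + 1) psis)
  have h2 := enum_countP_snd sig 0 (fun x => decide (x = o))
  have h3 : sig.countP (fun x => decide (x = o)) = sig.count o := by
    rw [List.count]; exact List.countP_congr (fun x _ => by simp)
  omega

theorem admLoopA_spec (sig : List Int) (psis : List (Int × Int)) (pbo : PySem.Dict Int (List Int))
    (hpbo : ∀ o, PySem.List.sorted (pbo.getD o []) (fun x => x) = admE sig psis o) :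
    ∀ (os : List Int) (pre : List Int) (osp : PySem.Dict Int Int),
    os.Pairwise (· < ·) →
    (∀ o ∈ os, 0 < sig.count o) →
    (∀ kv ∈ osp.items, kv.1 ≤ (pre.length : Int)) →
    (admLoopA (pre ++ os.flatMap (fun o => List.replicate (sig.count o) o)) pbo osp pre.length).items
      = osp.items ++ admR sig psis os (pre.length : Int) := by
  intro os
  induction os with
  | nil =>
    intro pre osp _ _ _
    rw [admLoopA]
    simp [admR]
  | cons o t ih =>
    intro pre osp hpair hcnt hkeys
    have hcpos : 0 < sig.count o := hcnt o (List.mem_cons_self ..)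
    rw [List.flatMap_cons]
    set R := t.flatMap (fun o => List.replicate (sig.count o) o) with hR
    set ss := pre ++ (List.replicate (sig.count o) o ++ R) with hss
    have hlen : pre.length < ss.length := by
      rw [hss, List.length_append, List.length_append, List.length_replicate]; omega
    have hrepl : List.replicate (sig.count o) o = o :: List.replicate (sig.count o - 1) o := by
      rw [← List.replicate_succ]; congr 1; omega
    have hgetd : ss.getD pre.length 0 = o := by
      rw [hss, List.getD_eq_getElem?_getD, List.getElem?_append_right (le_refl pre.length)]
      rw [hrepl]
      simp
    have hrest_ne : ∀ x ∈ R.head?, x ≠ o := by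
      intro x hx
      have hxm : x ∈ R := List.mem_of_mem_head? hx
      rw [hR] at hxm
      obtain ⟨o', ho', hx'⟩ := List.mem_flatMap.mp hxm
      rw [List.eq_of_mem_replicate hx']
      have : o < o' := (List.pairwise_cons.mp hpair).1 o' ho'
      omega
    have hskip : admSkipA ss o pre.length = pre.length + sig.count o := by
      rw [admSkipA_spec, hss, List.drop_left, takeWhile_replicate_append o _ R hrest_ne]
      simp
    rw [admLoopA, dif_pos hlen]
    simp only [hgetd, hskip, hpbo o]
    have hinner := innerFoldA (admE sig psis o) 0 osp (pre.length : Int)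
      (by intro kv hkv; have := hkeys kv hkv; omega)
    set osp' := (PySem.List.enumerate (admE sig psis o)).foldl
        (fun d je => d.insert ((pre.length : Int) + je.1 + 1) je.2) osp with hosp'
    have hkeys' : ∀ kv ∈ osp'.items, kv.1 ≤ ((pre ++ List.replicate (sig.count o) o).length : Int) := by
      intro kv hkv
      rw [hosp', hinner] at hkv
      rcases List.mem_append.mp hkv with h1 | h1
      · have := hkeys kv h1; simp; omega
      · obtain ⟨je, hje, rfl⟩ := List.mem_map.mp h1
        have hb := enum_mem_fst _ 0 je hje
        have hle := admE_length_le sig psis o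
        simp only [List.length_append, List.length_replicate]
        push_cast
        omega
    have hcall := ih (pre ++ List.replicate (sig.count o) o) osp' (List.pairwise_cons.mp hpair).2
        (fun o' ho' => hcnt o' (List.mem_cons_of_mem o ho')) hkeys'
    have hsame : (pre ++ List.replicate (sig.count o) o) ++ R = ss := by
      rw [hss, List.append_assoc]
    have hlen2 : (pre ++ List.replicate (sig.count o) o).length = pre.length + sig.count o := by
      simp
    rw [hsame, hlen2] at hcall
    rw [hcall, hosp', hinner]
    simp only [admR]
    rw [List.append_assoc]
    norm_cast

theorem admR_keys (sig : List Int) (psis : List (Int × Int)) :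
    ∀ (os : List Int) (pos : Int),
    (admR sig psis os pos).Pairwise (fun a b => a.1 < b.1)
      ∧ ∀ kv ∈ admR sig psis os pos, pos < kv.1 := by
  intro os
  induction os with
  | nil => intro pos; simp [admR]
  | cons o t ih =>
    intro pos
    have hm : (admE sig psis o).length ≤ sig.count o := admE_length_le sig psis o
    have hblock : ∀ kv ∈ (PySem.List.enumerate (admE sig psis o)).map
        (fun je => (pos + je.1 + 1, je.2)), pos < kv.1 ∧ kv.1 ≤ pos + (sig.count o : Int) := by
      intro kv hkv
      obtain ⟨je, hje, rfl⟩ := List.mem_map.mp hkv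
      have := enum_mem_fst _ 0 je hje
      simp only
      omega
    constructor
    · show (admR sig psis (o :: t) pos).Pairwise _
      simp only [admR]
      rw [List.pairwise_append]
      refine ⟨?_, (ih _).1, ?_⟩
      · refine List.Pairwise.map _ ?_ (enum_fst_pairwise (admE sig psis o) 0)
        intro a b hab
        simp only
        omega
      · intro a ha b hb
        have h1 := (hblock a ha).2
        have h2 := (ih (pos + (sig.count o : Int))).2 b hb
        omega
    · intro kv hkv
      simp only [admR, List.mem_append] at hkv
      rcases hkv with h1 | h1
      · exact (hblock kv h1).1
      · have := (ih (pos + (sig.count o : Int))).2 kv h1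
        have : (0 : Int) ≤ (sig.count o : Int) := Int.natCast_nonneg _
        omega

theorem sorted2_eq_self_of_fst_lt (xs : List (Int × Int))
    (h : xs.Pairwise (fun a b => a.1 < b.1)) :
    PySem.List.sorted2 xs (fun p => p.1) (fun p => p.2) = xs := by
  unfold PySem.List.sorted2
  simp only [if_neg (by simp : ¬ (false = true))]
  suffices H : ∀ (acc : List (Int × Int)),
      (∀ y ∈ acc, ∀ x ∈ xs, y.1 < x.1) →
      xs.foldl (fun acc x => PySem.List.insertBy
        (fun a b => decide (a.1 < b.1) || !decide (b.1 < a.1) && decide (a.2 < b.2)) x acc) acc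
        = acc ++ xs by
    simpa using H [] (by simp)
  induction xs with
  | nil => intro acc _; simp
  | cons x t ih =>
    intro acc hacc
    rw [List.pairwise_cons] at h
    simp only [List.foldl_cons]
    rw [PySem.List.insertBy_of_forall_not_before _ _ _ ?_]
    · rw [ih h.2 (acc ++ [x]) ?_]
      · simp
      · intro y hy z hz
        rcases List.mem_append.mp hy with h1 | h1
        · exact hacc y h1 z (List.mem_cons_of_mem x hz)
        · rw [List.mem_singleton] at h1; subst h1; exact h.1 z hz
    · intro y hy
      have := hacc y hy x (List.mem_cons_self ..)
      simp only [Bool.or_eq_false_iff, Bool.and_eq_false_iff]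
      constructor
      · simp; omega
      · left; simp; omega

theorem foldB_spec (sig : List Int) (psis : List (Int × Int)) (exps : PySem.Dict Int (List Int))
    (counts : PySem.Dict Int Int)
    (hE : ∀ o, PySem.List.sorted (exps.getD o []) (fun x => x) = admE sig psis o)
    (hc : ∀ o, counts.getD o 0 = (sig.count o : Int)) :
    ∀ (os : List Int) (acc : List (Int × Int)) (pos : Int),
    (os.foldl (fun st order =>
        ((PySem.List.enumerate (PySem.List.sorted (exps.getD order []) (fun x => x))).foldl
            (fun ps je => ps ++ [(st.2 + je.1 + 1, je.2)]) st.1,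
         st.2 + counts.getD order 0)) (acc, pos)).1 = acc ++ admR sig psis os pos := by
  intro os
  induction os with
  | nil => intro acc pos; simp [admR]
  | cons o t ih =>
    intro acc pos
    simp only [List.foldl_cons]
    rw [PySem.List.foldl_append_singleton_eq_map]
    rw [hE o, hc o, ih]
    simp [admR]

theorem flatMap_replicate_count (c : Int → Nat) (x : Int) :
    ∀ (os : List Int), os.Nodup →
    (os.flatMap (fun o => List.replicate (c o) o)).count x = if x ∈ os then c x else 0 := by
  intro os
  induction os with
  | nil => simp
  | cons o t ih =>
    intro hnd
    rw [List.nodup_cons] at hnd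
    simp only [List.flatMap_cons, List.count_append, List.count_replicate, ih hnd.2]
    by_cases hx : x = o
    · subst hx
      simp [hnd.1]
    · simp [hx, Ne.symm hx]

theorem flatMap_replicate_pairwise (c : Int → Nat) :
    ∀ (os : List Int), os.Pairwise (· < ·) →
    (os.flatMap (fun o => List.replicate (c o) o)).Pairwise (· ≤ ·) := by
  intro os
  induction os with
  | nil => simp
  | cons o t ih =>
    intro hp
    rw [List.pairwise_cons] at hp
    simp only [List.flatMap_cons]
    rw [List.pairwise_append]
    refine ⟨?_, ih hp.2, ?_⟩
    · exact List.pairwise_replicate.mpr (Or.inr (le_refl o))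
    · intro a ha b hb
      rw [List.eq_of_mem_replicate ha]
      obtain ⟨o', ho', hb'⟩ := List.mem_flatMap.mp hb
      rw [List.eq_of_mem_replicate hb']
      exact le_of_lt (hp.1 o' ho')

theorem sorted_sig_eq_flat (sig : List Int) :
    PySem.List.sorted sig (fun x => x)
      = (PySem.List.sorted (PySem.Set.ofList sig) (fun x => x)).flatMap
          (fun o => List.replicate (sig.count o) o) := by
  set os := PySem.List.sorted (PySem.Set.ofList sig) (fun x => x) with hos
  have hperm0 : os.Perm (PySem.Set.ofList sig) := PySem.List.sorted_perm _ _ _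
  have hnd : os.Nodup := hperm0.nodup_iff.mpr (PySem.Set.nodup_ofList sig)
  have hlt : os.Pairwise (· < ·) := PySem.List.sorted_ofList_pairwise_lt sig
  have hmem : ∀ x, x ∈ os ↔ x ∈ sig := by
    intro x
    rw [hperm0.mem_iff, PySem.Set.mem_ofList]
  refine PySem.List.sorted_id_eq_of_perm_of_pairwise sig _ ?_ ?_
  · rw [List.perm_iff_count]
    intro x
    rw [flatMap_replicate_count _ _ _ hnd]
    by_cases hx : x ∈ os
    · simp [hx]
    · have : x ∉ sig := fun hin => hx ((hmem x).mpr hin)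
      simp [hx, List.count_eq_zero.mpr this]
  · exact flatMap_replicate_pairwise _ os hlt

theorem ssig_eq_sorted (sig : List Int) (psis : List (Int × Int)) :
    ((PySem.List.enumerate (PySem.List.sorted (PySem.List.enumerate sig) (fun k => k.2))).foldl
      (admStepA psis) (PySem.Dict.empty, [], PySem.Dict.empty)).2.1
      = PySem.List.sorted sig (fun x => x) := by
  set es := PySem.List.sorted (PySem.List.enumerate sig) (fun k => k.2) with hes
  rw [foldA_ssig, enum_map_snd' es 0 (fun p : Int × Int => p.2)]
  show [] ++ es.map (fun q => q.2) = _
  rw [List.nil_append]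
  refine (PySem.List.sorted_id_eq_of_perm_of_pairwise sig _ ?_ ?_).symm
  · have h1 : es.Perm (PySem.List.enumerate sig) := PySem.List.sorted_perm _ _ _
    have h2 := h1.map (fun q : Int × Int => q.2)
    rwa [enum_map_snd sig 0] at h2
  · have := PySem.List.sorted_pairwise (PySem.List.enumerate sig) (fun k : Int × Int => k.2)
    rw [← hes] at this
    exact List.pairwise_map.mpr this

theorem pbo_eq_admE (sig : List Int) (psis : List (Int × Int)) (o : Int) :
    PySem.List.sorted
      ((((PySem.List.enumerate (PySem.List.sorted (PySem.List.enumerate sig) (fun k => k.2))).foldl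
        (admStepA psis) (PySem.Dict.empty, [], PySem.Dict.empty)).2.2).getD o []) (fun x => x)
      = admE sig psis o := by
  set es := PySem.List.sorted (PySem.List.enumerate sig) (fun k => k.2) with hes
  rw [foldA_pbo]
  rw [show (PySem.Dict.empty : PySem.Dict Int (List Int)).getD o [] = [] from PySem.Dict.getD_empty o []]
  rw [List.nil_append]
  rw [enum_filterMap_snd es 0 (fun p : Int × Int => if p.2 = o then List.lookup (p.1 + 1) psis else none)]
  unfold admE
  refine PySem.List.sorted_eq_sorted_of_perm _ _ _ (fun a b h => h) ?_
  exact (PySem.List.sorted_perm (PySem.List.enumerate sig) (fun k : Int × Int => k.2) false).filterMap _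

-- ===== VERDICT (by name: the statement is the Claim_ definition above) =====
theorem adm_key_spec : Claim_equal_adm_key := by
  intro sig psis _
  show adm_key sig psis = adm_key_alt sig psis
  have hlt : (PySem.List.sorted (PySem.Set.ofList sig) (fun x => x)).Pairwise (· < ·) :=
    PySem.List.sorted_ofList_pairwise_lt sig
  have hcnt : ∀ o ∈ PySem.List.sorted (PySem.Set.ofList sig) (fun x => x), 0 < sig.count o := by
    intro o ho
    rw [PySem.List.mem_sorted, PySem.Set.mem_ofList] at ho
    exact List.count_pos_iff.mpr ho
  have hkeysR := admR_keys sig psis (PySem.List.sorted (PySem.Set.ofList sig) (fun x => x)) 0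
  -- A's side
  have hA : adm_key sig psis
      = (PySem.List.sorted sig (fun x => x),
         admR sig psis (PySem.List.sorted (PySem.Set.ofList sig) (fun x => x)) 0) := by
    simp only [adm_key]
    rw [ssig_eq_sorted sig psis]
    have hloop := admLoopA_spec sig psis _ (pbo_eq_admE sig psis)
        (PySem.List.sorted (PySem.Set.ofList sig) (fun x => x)) [] PySem.Dict.empty
        hlt hcnt (by intro kv hkv; simp [PySem.Dict.empty] at hkv)
    rw [List.nil_append] at hloop
    rw [← sorted_sig_eq_flat sig] at hloop
    simp only [List.length_nil, Nat.cast_zero] at hloop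
    rw [hloop]
    rw [show (PySem.Dict.empty : PySem.Dict Int Int).items
          ++ admR sig psis (PySem.List.sorted (PySem.Set.ofList sig) (fun x => x)) 0
        = admR sig psis (PySem.List.sorted (PySem.Set.ofList sig) (fun x => x)) 0 from by
      simp [PySem.Dict.empty]]
    rw [sorted2_eq_self_of_fst_lt _ hkeysR.1]
  -- B's side
  have hB : adm_key_alt sig psis
      = (PySem.List.sorted sig (fun x => x),
         admR sig psis (PySem.List.sorted (PySem.Set.ofList sig) (fun x => x)) 0) := by
    simp only [adm_key_alt]
    have hE : ∀ o, PySem.List.sorted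
        (((PySem.List.enumerate sig).foldl
          (fun d p => match List.lookup (p.1 + 1) psis with
            | some e => d.modify p.2 [] (· ++ [e])
            | none => d) PySem.Dict.empty).getD o []) (fun x => x) = admE sig psis o := by
      intro o
      rw [foldB_exps]
      rw [show (PySem.Dict.empty : PySem.Dict Int (List Int)).getD o [] = [] from PySem.Dict.getD_empty o []]
      rw [List.nil_append]
      rfl
    have hc : ∀ o, (PySem.Dict.counter sig).getD o 0 = (sig.count o : Int) :=
      fun o => PySem.Dict.getD_counter sig o
    rw [PySem.Dict.keys_counter]
    rw [foldB_spec sig psis _ _ hE hc]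
    rw [List.nil_append]
  rw [hA, hB]
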